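-- pv_equiv track=rewrite | github.com/asorin/com | dcom/metrics.py | _correlation_list
-- ===== SOURCE A (Python) =====
-- def _correlation_list(vmap):
--     maxkey = max(vmap.keys())
--     values = []
--     for i in range(0, maxkey+1):
--         if i in vmap:
--             values.append(vmap[i])
--         else:
--             values.append(0)
--     return ",".join(map(_str_nozero, values))
--
-- def _str_nozero(val):
--     return str(val) if val!=0 else ""
-- ===== SOURCE B (Python) =====
-- def _correlation_list(vmap):
--     maxkey = max(vmap.keys())
--     fields = []
--     prev = -1
--     for k in sorted(k for k in vmap if k >= 0):
--         fields.extend([""] * (k - prev - 1))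
--         fields.append(_str_nozero(vmap[k]))
--         prev = k
--     fields.extend([""] * (maxkey - prev))
--     return ",".join(fields)
--
-- def _str_nozero(val):
--     return str(val) if val != 0 else ""
-- ===== Notes on version B (the rewrite author's own statement) =====
-- stated objective: alternative
-- what changed: B sorts the nonnegative keys and emits the CSV sparsely in one pass over them, filling each gap between consecutive keys with a run of blank fields, instead of A's dense scan of every index 0..maxkey with a dict membership test and lookup per index.
import Mathlib
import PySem

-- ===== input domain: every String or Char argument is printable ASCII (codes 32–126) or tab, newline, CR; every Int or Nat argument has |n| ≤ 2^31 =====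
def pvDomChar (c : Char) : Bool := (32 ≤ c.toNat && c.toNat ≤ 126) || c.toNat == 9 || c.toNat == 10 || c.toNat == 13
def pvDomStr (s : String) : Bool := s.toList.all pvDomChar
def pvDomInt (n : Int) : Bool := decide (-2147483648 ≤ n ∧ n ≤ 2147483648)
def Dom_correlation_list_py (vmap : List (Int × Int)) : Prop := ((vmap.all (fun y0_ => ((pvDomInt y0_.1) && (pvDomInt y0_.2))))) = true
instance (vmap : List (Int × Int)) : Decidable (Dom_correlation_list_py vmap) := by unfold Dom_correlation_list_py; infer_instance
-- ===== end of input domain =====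

-- B sorts the nonnegative keys and emits the CSV sparsely, filling gaps with blank-field runs, instead of A's dense index scan with per-index dict probes.


-- ===== PORT A =====
-- _str_nozero, used verbatim by both Pythons
def pvStrNozero (val : Int) : String := if val ≠ 0 then PySem.Int.toStr val else ""

def correlation_list_py (vmap : List (Int × Int)) : String :=
  let d := PySem.Dict.ofList vmap
  match PySem.List.max? d.keys (fun x => x) with
  | none => ""  -- unreachable under Pre_: max() of empty keys raises ValueError
  | some maxkey =>
      let values : List Int := (PySem.List.pyRange 0 (maxkey + 1) 1).foldl
        (fun values i => if d.contains i then values ++ [d.getD i 0] else values ++ [(0 : Int)]) []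
      PySem.Str.join "," (values.map pvStrNozero)

-- ===== PORT B =====
def correlation_list_py_alt (vmap : List (Int × Int)) : String :=
  let d := PySem.Dict.ofList vmap
  match PySem.List.max? d.keys (fun x => x) with
  | none => ""  -- unreachable under Pre_: max() of empty keys raises ValueError
  | some maxkey =>
      -- for k in sorted(k for k in vmap if k >= 0): … ; prev/fields are the loop state.
      -- vmap[k] cannot raise here (k is a key), so d.getD k 0 is exact.
      let st := (PySem.List.sorted ((PySem.Dict.ofList vmap).keys.filter (fun k => decide (0 ≤ k))) (fun x => x) false).foldl
        (fun (st : List String × Int) k =>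
          (st.1 ++ List.replicate (k - st.2 - 1).toNat "" ++ [pvStrNozero (d.getD k 0)], k))
        ([], -1)
      PySem.Str.join "," (st.1 ++ List.replicate (maxkey - st.2).toNat "")

-- ===== PRECONDITION & SPEC =====
-- Pre_ excludes only the empty dict, on which both A and B raise ValueError from max().
def Pre_correlation_list_py (vmap : List (Int × Int)) : Prop := vmap ≠ []
instance (vmap : List (Int × Int)) : Decidable (Pre_correlation_list_py vmap) := by unfold Pre_correlation_list_py; infer_instance
def pvWitness_correlation_list_py : (List (Int × Int)) := [(3, 5), (-2, 7), (0, 0)]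

def Spec_correlation_list_py (vmap : List (Int × Int)) (out : String) : Prop := out = correlation_list_py_alt vmap
instance (vmap : List (Int × Int)) (out : String) : Decidable (Spec_correlation_list_py vmap out) := by unfold Spec_correlation_list_py; infer_instance

-- ===== CLAIM =====
def Claim_equal_correlation_list_py : Prop := ∀ (vmap : List (Int × Int)), Dom_correlation_list_py vmap → Pre_correlation_list_py vmap → Spec_correlation_list_py vmap (correlation_list_py vmap)

-- ===== LEMMAS AND PROOFS =====

-- the per-index field of the CSV, as a function of the dict
def pvField (d : PySem.Dict Int Int) (j : Int) : String :=
  match d.get? j with | some v => pvStrNozero v | none => ""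

-- B's loop, as structural recursion on the sorted key list
def pvLoop (d : PySem.Dict Int Int) : List Int → Int → List String
  | [], _ => []
  | k :: t, prev =>
      List.replicate (k - prev - 1).toNat "" ++ [pvStrNozero (d.getD k 0)] ++ pvLoop d t k

-- B's foldl is pvLoop together with the last processed key
theorem pv_foldl_eq_loop (d : PySem.Dict Int Int) :
    ∀ (ks : List Int) (acc : List String) (prev : Int),
      ks.foldl (fun (st : List String × Int) k =>
          (st.1 ++ List.replicate (k - st.2 - 1).toNat "" ++ [pvStrNozero (d.getD k 0)], k))
        (acc, prev)
      = (acc ++ pvLoop d ks prev, ks.getLastD prev) := by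
  intro ks
  induction ks with
  | nil => intro acc prev; simp [pvLoop]
  | cons k t ih =>
      intro acc prev
      rw [List.foldl_cons, ih, List.getLastD_cons]
      simp [pvLoop, List.append_assoc]

-- generic: append-one-per-element fold is map
theorem pv_foldl_append_map {α β : Type} (f : α → β) :
    ∀ (l : List α) (init : List β),
      l.foldl (fun acc i => acc ++ [f i]) init = init ++ l.map f := by
  intro l
  induction l with
  | nil => simp
  | cons h t ih => intro init; simp [List.foldl, ih]

-- A's per-index value, phrased through get?
theorem pv_gather_entry (d : PySem.Dict Int Int) (i : Int) :
    pvStrNozero (if d.contains i then d.getD i 0 else 0) = pvField d i := by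
  cases hg : d.get? i with
  | some v =>
    have hc : d.contains i = true := by
      rw [PySem.Dict.contains_eq_isSome_get?, hg]; rfl
    simp [pvField, hc, hg, PySem.Dict.getD_of_get?_eq_some d 0 hg]
  | none =>
    have hc : d.contains i = false := by
      rw [PySem.Dict.contains_eq_isSome_get?, hg]; rfl
    simp [pvField, hc, hg, pvStrNozero]

-- in a strictly increasing list, every element is ≤ the last
theorem pv_le_getLast : ∀ (ks : List Int) (h : ks ≠ []),
    ks.Pairwise (· < ·) → ∀ x ∈ ks, x ≤ ks.getLast h := by
  intro ks
  induction ks with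
  | nil => intro h; exact absurd rfl h
  | cons k t ih =>
      intro _ hp x hx
      rcases List.pairwise_cons.mp hp with ⟨hkall, hpt⟩
      cases t with
      | nil => simp at hx; simp [hx]
      | cons a s =>
          rw [List.getLast_cons (by simp)]
          rcases List.mem_cons.mp hx with rfl | hx
          · exact le_of_lt (lt_of_lt_of_le (hkall _ (by simp))
              (ih (by simp) hpt a (by simp)))
          · exact ih (by simp) hpt x hx

-- the heart: the sparse gap-filling loop writes out exactly the dense field map
theorem pv_loop_eq_map (d : PySem.Dict Int Int) (m : Int) :
    ∀ (ks : List Int) (prev : Int),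
      ks.Pairwise (· < ·) →
      (∀ k ∈ ks, prev < k ∧ k ≤ m) →
      (∀ j : Int, prev < j → j ≤ m → ((d.get? j).isSome = true ↔ j ∈ ks)) →
      (m ∈ ks ∨ (ks = [] ∧ prev = m)) →
      pvLoop d ks prev = (PySem.List.pyRange (prev + 1) (m + 1) 1).map (pvField d) := by
  intro ks
  induction ks with
  | nil =>
      intro prev _ _ _ hC
      rcases hC with h | ⟨_, rfl⟩
      · simp at h
      · simp [pvLoop]
  | cons k t ih =>
      intro prev hp hb hmem hC
      rcases List.pairwise_cons.mp hp with ⟨hkall, hpt⟩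
      obtain ⟨hprevk, hkm⟩ := hb k (by simp)
      -- split the range at k and k+1
      rw [PySem.List.pyRange_one_append (prev + 1) k (m + 1) (by omega) (by omega),
          PySem.List.pyRange_one_append k (k + 1) (m + 1) (by omega) (by omega)]
      have hsing : PySem.List.pyRange k (k + 1) 1 = [k] := by
        simp [PySem.List.pyRange_one]
      rw [hsing]
      simp only [List.map_append, List.map_cons, List.map_nil]
      have hgap : (PySem.List.pyRange (prev + 1) k 1).map (pvField d)
          = List.replicate (k - prev - 1).toNat "" := by
        apply List.eq_replicate_iff.mpr
        constructor
        · simp [PySem.List.length_pyRange_one]; omega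
        · intro b hb'
          rcases List.mem_map.mp hb' with ⟨j, hj, rfl⟩
          rcases (PySem.List.mem_pyRange_one).mp hj with ⟨hj1, hj2⟩
          have hnot : j ∉ k :: t := by
            intro hjin
            rcases List.mem_cons.mp hjin with rfl | hjt
            · omega
            · exact absurd (hkall j hjt) (by omega)
          have : d.get? j = none := by
            cases hg : d.get? j with
            | none => rfl
            | some v =>
                exact absurd ((hmem j (by omega) (by omega)).mp (by rw [hg]; rfl)) hnot
          simp [pvField, this]
      have hkfield : pvStrNozero (d.getD k 0) = pvField d k := by
        have : (d.get? k).isSome = true :=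
          (hmem k hprevk hkm).mpr (by simp)
        cases hg : d.get? k with
        | none => rw [hg] at this; simp at this
        | some v =>
            simp [pvField, hg, PySem.Dict.getD_of_get?_eq_some d 0 hg]
      have hrec : pvLoop d t k = (PySem.List.pyRange (k + 1) (m + 1) 1).map (pvField d) := by
        apply ih k hpt
        · intro k' hk'; exact ⟨hkall k' hk', (hb k' (by simp [hk'])).2⟩
        · intro j hj1 hj2
          rw [hmem j (by omega) hj2]
          constructor
          · intro h
            rcases List.mem_cons.mp h with rfl | h
            · omega
            · exact h
          · intro h; exact List.mem_cons_of_mem _ h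
        · rcases hC with hmk | ⟨h, _⟩
          · rcases List.mem_cons.mp hmk with rfl | hmt
            · right
              constructor
              · cases t with
                | nil => rfl
                | cons a s => exact absurd (hb a (by simp)).2 (by have := hkall a (by simp); omega)
              · rfl
            · left; exact hmt
          · simp at h
      rw [pvLoop, hgap, hkfield, hrec]
      simp [List.append_assoc]

-- A's gathered values are the dense field map
theorem pv_values_eq_map (d : PySem.Dict Int Int) (m : Int) :
    ((PySem.List.pyRange 0 (m + 1) 1).foldl
        (fun values i => if d.contains i then values ++ [d.getD i 0] else values ++ [(0 : Int)]) []).map pvStrNozero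
      = (PySem.List.pyRange 0 (m + 1) 1).map (pvField d) := by
  have hstep : (fun (values : List Int) (i : Int) =>
      if d.contains i then values ++ [d.getD i 0] else values ++ [(0 : Int)]) =
      fun values i => values ++ [if d.contains i then d.getD i 0 else 0] := by
    funext values i; split <;> rfl
  rw [hstep, pv_foldl_append_map]
  simp only [List.nil_append, List.map_map]
  exact List.map_congr_left (fun i _ => pv_gather_entry d i)

-- ===== VERDICT =====
theorem correlation_list_py_spec : Claim_equal_correlation_list_py := by
  intro vmap _ _
  unfold Spec_correlation_list_py correlation_list_py correlation_list_py_alt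
  cases hm : PySem.List.max? (PySem.Dict.ofList vmap).keys (fun x => x) with
  | none => simp only [hm]
  | some m =>
    simp only [hm]
    set d := PySem.Dict.ofList vmap with hd
    have hmmem : m ∈ d.keys := PySem.List.max?_mem hm
    have hmax : ∀ y ∈ d.keys, y ≤ m := by
      intro y hy; exact PySem.List.max?_isMax hm y hy
    set ks := PySem.List.sorted (d.keys.filter (fun k => decide (0 ≤ k))) (fun x => x) false with hks
    have hmemks : ∀ j : Int, j ∈ ks ↔ j ∈ d.keys ∧ 0 ≤ j := by
      intro j
      rw [hks, PySem.List.mem_sorted, List.mem_filter]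
      simp
    have hnd : ks.Nodup := by
      have : (d.keys.filter (fun k => decide (0 ≤ k))).Nodup :=
        (PySem.Dict.nodup_keys_ofList vmap).filter _
      exact (PySem.List.sorted_perm _ _ _).nodup_iff.mpr this
    have hpl : ks.Pairwise (· < ·) := by
      have hle : ks.Pairwise (fun a b => a ≤ b) := PySem.List.sorted_pairwise _ _
      exact (hle.and hnd).imp (fun h => lt_of_le_of_ne h.1 h.2)
    rw [pv_foldl_eq_loop]
    by_cases hm0 : 0 ≤ m
    · -- some key is nonnegative: m itself is the last sorted key
      have hmks : m ∈ ks := (hmemks m).mpr ⟨hmmem, hm0⟩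
      have hne : ks ≠ [] := fun h => by simp [h] at hmks
      have hlast : ks.getLast hne = m := by
        apply le_antisymm
        · exact hmax _ ((hmemks _).mp (List.getLast_mem hne)).1
        · exact pv_le_getLast ks hne hpl m hmks
      have hloop : pvLoop d ks (-1) = (PySem.List.pyRange 0 (m + 1) 1).map (pvField d) := by
        have := pv_loop_eq_map d m ks (-1) hpl
          (fun k hk => ⟨by have := ((hmemks k).mp hk).2; omega, hmax k ((hmemks k).mp hk).1⟩)
          (fun j hj1 hj2 => by
            rw [hmemks j]
            constructor
            · intro h
              cases hg : d.get? j with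
              | none => rw [hg] at h; simp at h
              | some v => exact ⟨PySem.Dict.mem_keys_of_mem_items d (PySem.Dict.mem_items_of_get?_eq_some d hg), by omega⟩
            · intro ⟨h, _⟩
              cases hg : d.get? j with
              | none => exact absurd hg ((not_iff_not.mpr (PySem.Dict.get?_eq_none_iff_not_mem_keys d j)).mpr (by simp [h]))
              | some v => rfl)
          (Or.inl hmks)
        simpa using this
      have hlastD : ks.getLastD (-1) = m := by
        cases hks' : ks with
        | nil => exact absurd hks' hne
        | cons a s =>
            rw [← hks']
            rw [List.getLastD_eq_getLast?, List.getLast?_eq_some_getLast hne, hlast]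
            rfl
      rw [hloop, hlastD]
      rw [pv_values_eq_map d m]
      simp
    · -- all keys negative: both sides are the empty join
      have hksnil : ks = [] := by
        cases hks' : ks with
        | nil => rfl
        | cons a s =>
            have ha := (hmemks a).mp (by rw [hks']; simp)
            have := hmax a ha.1
            omega
      have hrange : PySem.List.pyRange 0 (m + 1) 1 = [] := by
        simp [PySem.List.pyRange_one]
        omega
      have htz : ((m : Int) + 1).toNat = 0 := by omega
      rw [hksnil, hrange]
      simp [pvLoop, htz]
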